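-- pv_equiv track=rewrite | github.com/FabianJuarez182/Data_Encryption | Ejercicios/EjercicioCriptografia/Parte 2/BASE64toASCII.py | base64_a_binario
-- ===== SOURCE A (Python) =====
-- TABLA_BASE64 = "ABCDEFGHIJKLMNOPQRSTUVWXYZabcdefghijklmnopqrstuvwxyz0123456789+/"
--
-- def decimal_a_binario(decimal, bits=8):
--     # Inicializar la representación binaria como una cadena vacía
--     binario = ""
--     # Realizar la conversión dividiendo entre 2 y registrando los restos
--     while decimal > 0:
--         resto = decimal % 2
--         binario = str(resto) + binario
--         decimal //= 2
--     # Asegurar que la representación tenga el número de bits especificado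
--     binario = binario.zfill(bits)
--     return binario
--
-- def base64_a_binario(texto_base64):
--     # Lista para almacenar los valores binarios
--     binario = []
--
--     # Procesar cada carácter del texto en Base64 (sin incluir el padding '=')
--     for caracter in texto_base64:
--         if caracter == '=':
--             continue  # Ignorar el relleno
--         # Encontrar el índice del carácter en la tabla Base64
--         indice = TABLA_BASE64.index(caracter)
--         # Convertir el índice a binario (6 bits para cada carácter)
--         valor_binario = decimal_a_binario(indice, bits=6)
--         binario.append(valor_binario)
--
--     # Unir todos los binarios en un solo string
--     binario_completo = ''.join(binario)
--
--     # Remover los bits sobrantes que no completan un byte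
--     sobrantes = len(binario_completo) % 8
--     if sobrantes != 0:
--         binario_completo = binario_completo[:-sobrantes]
--
--     # Dividir en grupos de 8 bits para representar bytes
--     binario_en_bytes = [binario_completo[i:i+8] for i in range(0, len(binario_completo), 8)]
--
--     return ' '.join(binario_en_bytes)
-- ===== SOURCE B (Python) =====
-- TABLA_BASE64 = "ABCDEFGHIJKLMNOPQRSTUVWXYZabcdefghijklmnopqrstuvwxyz0123456789+/"
--
-- def base64_a_binario(texto_base64):
--     # Single-pass bit accumulator: no per-character 6-bit strings, no re-chunking pass.
--     buffer = 0
--     bits = 0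
--     bytes_bin = []
--     for caracter in texto_base64:
--         if caracter == '=':
--             continue  # ignorar el relleno
--         indice = TABLA_BASE64.index(caracter)
--         buffer = (buffer << 6) + indice
--         bits += 6
--         if bits >= 8:
--             bits -= 8
--             bytes_bin.append(format((buffer >> bits) & 0xFF, '08b'))
--             buffer &= (1 << bits) - 1  # keep only the leftover bits
--     return ' '.join(bytes_bin)
-- ===== Notes on version B (the rewrite author's own statement) =====
-- stated objective: faster
-- what changed: Replaced per-character 6-bit string building followed by whole-string truncation and re-chunking with a single-pass masked bit accumulator that emits each 8-bit byte as soon as it completes.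
import Mathlib
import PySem

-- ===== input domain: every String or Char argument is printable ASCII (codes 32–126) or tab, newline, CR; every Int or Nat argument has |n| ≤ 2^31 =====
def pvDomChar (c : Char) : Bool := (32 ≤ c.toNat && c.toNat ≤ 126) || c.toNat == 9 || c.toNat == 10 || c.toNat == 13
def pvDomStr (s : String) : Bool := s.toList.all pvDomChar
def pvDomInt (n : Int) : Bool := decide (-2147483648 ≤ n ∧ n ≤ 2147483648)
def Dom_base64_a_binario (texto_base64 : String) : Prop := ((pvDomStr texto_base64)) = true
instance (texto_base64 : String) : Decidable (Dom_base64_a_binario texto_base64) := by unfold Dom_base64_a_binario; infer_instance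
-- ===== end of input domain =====

-- B replaces A's per-character 6-bit strings + truncate + re-chunk passes by a single-pass
-- masked bit accumulator emitting each completed byte (measurably faster by a constant factor).

-- ===== PORT A =====
def pvTABLA : List Char := "ABCDEFGHIJKLMNOPQRSTUVWXYZabcdefghijklmnopqrstuvwxyz0123456789+/".toList

-- 'while decimal > 0' loop of decimal_a_binario; the fuel (decimal.toNat + 1) only makes the
-- loop total: decimal strictly decreases by at least 1 each iteration, so it is never exhausted.
def decBinLoop : Nat → Int → List Char → List Char
  | 0, _, binario => binario
  | fuel + 1, decimal, binario =>
    if 0 < decimal then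
      decBinLoop fuel (PySem.Int.floordiv decimal 2)
        (PySem.Int.toChars (PySem.Int.mod decimal 2) ++ binario)
    else binario

def decimal_a_binario (decimal : Int) (bits : Int) : List Char :=
  PySem.Chars.zfill (decBinLoop (decimal.toNat + 1) decimal []) bits

def base64_a_binario (texto_base64 : String) : String :=
  let binario := texto_base64.toList.foldl
    (fun acc caracter =>
      if caracter = '=' then acc
      else acc ++ [decimal_a_binario ((PySem.List.index? pvTABLA caracter).getD 0 : Nat) 6]) []
  let binario_completo := PySem.Chars.join [] binario
  let sobrantes := PySem.Int.mod (PySem.List.len binario_completo) 8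
  let binario_completo2 :=
    if sobrantes ≠ 0 then PySem.List.slice binario_completo none (some (-sobrantes))
    else binario_completo
  let binario_en_bytes := (PySem.List.pyRange 0 (PySem.List.len binario_completo2) 8).map
    (fun i => PySem.List.slice binario_completo2 (some i) (some (i + 8)))
  String.ofList (PySem.Chars.join [' '] binario_en_bytes)

-- ===== PORT B =====
-- format(x, '08b') for x ≥ 0 (exact there: zero-padded binary without sign).
def pvFmt08 (x : Nat) : List Char := PySem.Chars.zfill (PySem.Int.toBinChars (x : Int)) 8

def b64StepB (st : Nat × Nat × List (List Char)) (caracter : Char) : Nat × Nat × List (List Char) :=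
  if caracter = '=' then st
  else
    let indice := (PySem.List.index? pvTABLA caracter).getD 0
    let buffer := (st.1 <<< 6) + indice
    let bits := st.2.1 + 6
    if 8 ≤ bits then
      let bits2 := bits - 8
      (buffer &&& ((1 <<< bits2) - 1), bits2, st.2.2 ++ [pvFmt08 ((buffer >>> bits2) &&& 255)])
    else
      (buffer, bits, st.2.2)

def base64_a_binario_alt (texto_base64 : String) : String :=
  let st := texto_base64.toList.foldl b64StepB (0, 0, [])
  String.ofList (PySem.Chars.join [' '] st.2.2)

-- ===== PRECONDITION & SPEC =====
-- Pre_ excludes exactly the inputs containing a character that is neither '=' nor in the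
-- Base64 table: there A raises ValueError (TABLA_BASE64.index), and B raises the same.
def Pre_base64_a_binario (texto_base64 : String) : Prop :=
  (texto_base64.toList.all (fun c => c == '=' || pvTABLA.contains c)) = true
instance (texto_base64 : String) : Decidable (Pre_base64_a_binario texto_base64) := by
  unfold Pre_base64_a_binario; infer_instance

def pvWitness_base64_a_binario : String := "TWFu"

def Spec_base64_a_binario (texto_base64 : String) (out : String) : Prop := out = base64_a_binario_alt texto_base64
instance (texto_base64 : String) (out : String) : Decidable (Spec_base64_a_binario texto_base64 out) := by unfold Spec_base64_a_binario; infer_instance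

-- ===== CLAIM (what is proved, stated in full; the proofs are below) =====
def Claim_equal_base64_a_binario : Prop := ∀ (texto_base64 : String), Dom_base64_a_binario texto_base64 → Pre_base64_a_binario texto_base64 → Spec_base64_a_binario texto_base64 (base64_a_binario texto_base64)

-- ===== LEMMAS AND PROOFS =====

-- Low w bits of n, big-endian, as '0'/'1' characters.
def natBits : Nat → Nat → List Char
  | _, 0 => []
  | n, w + 1 => natBits (n / 2) w ++ [if n % 2 = 1 then '1' else '0']

theorem length_natBits (n w : Nat) : (natBits n w).length = w := by
  induction w generalizing n with
  | zero => rfl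
  | succ w ih => simp [natBits, ih]

theorem natBits_mod (n w : Nat) : natBits (n % 2 ^ w) w = natBits n w := by
  induction w generalizing n with
  | zero => rfl
  | succ w ih =>
    have h1 : n % 2 ^ (w + 1) / 2 = n / 2 % 2 ^ w := by
      rw [pow_succ, Nat.mul_comm]; exact Nat.mod_mul_right_div_self n 2 (2 ^ w)
    have h2 : n % 2 ^ (w + 1) % 2 = n % 2 := by
      exact Nat.mod_mod_of_dvd n (dvd_pow_self 2 (Nat.succ_ne_zero w))
    simp [natBits, h1, h2, ih]

theorem natBits_split (w1 w2 n : Nat) :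
    natBits n (w1 + w2) = natBits (n >>> w2) w1 ++ natBits n w2 := by
  induction w2 generalizing n with
  | zero => simp [natBits]
  | succ w2 ih =>
    have hsh : n >>> (w2 + 1) = (n / 2) >>> w2 := by
      simp [Nat.shiftRight_eq_div_pow, Nat.div_div_eq_div_mul, pow_succ, Nat.mul_comm]
    show natBits n (w1 + w2 + 1) = _
    simp only [natBits, ih (n / 2), hsh, List.append_assoc]

set_option maxRecDepth 10000 in
theorem fmt08_eq_natBits : ∀ x : Nat, x < 256 → pvFmt08 x = natBits x 8 := by decide

set_option maxRecDepth 10000 in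
theorem dec_eq_natBits : ∀ n : Nat, n < 64 → decimal_a_binario (n : Nat) 6 = natBits n 6 := by decide

theorem join_nil_eq_flatten (parts : List (List Char)) :
    PySem.Chars.join [] parts = parts.flatten := by
  induction parts with
  | nil => rfl
  | cons a l ih =>
    cases l with
    | nil => simp [PySem.Chars.join, List.intercalate]
    | cons b m =>
      rw [PySem.Chars.join_cons_cons, ih]
      simp

-- index list of the non-'=' characters
def idxListOf : List Char → List Nat
  | [] => []
  | c :: cs =>
    if c = '=' then idxListOf cs
    else (PySem.List.index? pvTABLA c).getD 0 :: idxListOf cs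

theorem idx_lt_64 (c : Char) (hc : c ∈ pvTABLA) :
    (PySem.List.index? pvTABLA c).getD 0 < 64 := by
  have hs : (PySem.List.index? pvTABLA c).isSome := (PySem.List.index?_isSome_iff _ _).mpr hc
  cases h : PySem.List.index? pvTABLA c with
  | none => rw [h] at hs; simp at hs
  | some k =>
    obtain ⟨hk, -, -⟩ := PySem.List.getElem_of_index?_eq_some h
    have hlen : pvTABLA.length = 64 := by decide
    simpa [hlen] using hk

theorem idxListOf_lt (cs : List Char) (h : ∀ c ∈ cs, c = '=' ∨ c ∈ pvTABLA) :
    ∀ i ∈ idxListOf cs, i < 64 := by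
  induction cs with
  | nil => simp [idxListOf]
  | cons c cs ih =>
    have hc := h c List.mem_cons_self
    have h' : ∀ c ∈ cs, c = '=' ∨ c ∈ pvTABLA := fun d hd => h d (List.mem_cons_of_mem _ hd)
    by_cases he : c = '='
    · simpa [idxListOf, he] using ih h'
    · have hmem : c ∈ pvTABLA := hc.resolve_left he
      intro i hi
      rcases (by simpa [idxListOf, he] using hi : i = _ ∨ i ∈ idxListOf cs) with h1 | h2
      · exact h1 ▸ idx_lt_64 c hmem
      · exact ih h' i h2

-- B's step on a bare index (what b64StepB does on a non-'=' character)
def stepI (st : Nat × Nat × List (List Char)) (indice : Nat) : Nat × Nat × List (List Char) :=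
  let buffer := (st.1 <<< 6) + indice
  let bits := st.2.1 + 6
  if 8 ≤ bits then
    let bits2 := bits - 8
    (buffer &&& ((1 <<< bits2) - 1), bits2, st.2.2 ++ [pvFmt08 ((buffer >>> bits2) &&& 255)])
  else
    (buffer, bits, st.2.2)

theorem foldB_eq_foldI (cs : List Char) (st : Nat × Nat × List (List Char)) :
    cs.foldl b64StepB st = (idxListOf cs).foldl stepI st := by
  induction cs generalizing st with
  | nil => rfl
  | cons c cs ih =>
    by_cases hc : c = '='
    · simp only [List.foldl_cons, idxListOf, hc, if_pos, b64StepB]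
      exact ih st
    · simp only [List.foldl_cons, idxListOf, if_neg hc]
      rw [ih]
      congr 1
      simp [b64StepB, stepI, hc]

theorem foldA_eq (cs : List Char) (acc : List (List Char)) :
    cs.foldl (fun acc caracter =>
      if caracter = '=' then acc
      else acc ++ [decimal_a_binario ((PySem.List.index? pvTABLA caracter).getD 0 : Nat) 6]) acc
    = acc ++ (idxListOf cs).map (fun n => decimal_a_binario (n : Nat) 6) := by
  induction cs generalizing acc with
  | nil => simp [idxListOf]
  | cons c cs ih =>
    by_cases hc : c = '='
    · simp only [List.foldl_cons, idxListOf, hc]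
      exact ih acc
    · simp only [List.foldl_cons, idxListOf, if_neg hc, List.map_cons]
      rw [ih]
      simp

-- main invariant for B's accumulator run
theorem B_run (idxs : List Nat) (hlt : ∀ i ∈ idxs, i < 64) :
    ∀ buf bits out, bits < 8 → (∀ o ∈ out, o.length = 8) →
    (idxs.foldl stepI (buf, bits, out)).2.1 < 8 ∧
    (∀ o ∈ (idxs.foldl stepI (buf, bits, out)).2.2, o.length = 8) ∧
    ((idxs.foldl stepI (buf, bits, out)).2.2.flatten
        ++ natBits (idxs.foldl stepI (buf, bits, out)).1 (idxs.foldl stepI (buf, bits, out)).2.1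
      = out.flatten ++ natBits buf bits ++ (idxs.map (fun n => natBits n 6)).flatten) := by
  induction idxs with
  | nil => intro buf bits out hb h8; exact ⟨hb, h8, by simp⟩
  | cons i rest ih =>
    intro buf bits out hb h8
    have hi : i < 64 := hlt i List.mem_cons_self
    have hlt' : ∀ j ∈ rest, j < 64 := fun j hj => hlt j (List.mem_cons_of_mem _ hj)
    have ih' := ih hlt'
    set x := (buf <<< 6) + i with hxdef
    have hx6 : x >>> 6 = buf := by
      rw [hxdef, Nat.shiftRight_eq_div_pow, Nat.shiftLeft_eq]
      norm_num
      omega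
    have hxmod : x % 64 = i := by
      rw [hxdef, Nat.shiftLeft_eq]
      norm_num
      omega
    have hkey : natBits x (bits + 6) = natBits buf bits ++ natBits i 6 := by
      rw [natBits_split bits 6 x, hx6, ← natBits_mod x 6]
      norm_num [hxmod]
    by_cases hle : 8 ≤ bits + 6
    · -- emit a byte
      have hstep : stepI (buf, bits, out) i =
          (x % 2 ^ (bits - 2), bits - 2,
            out ++ [pvFmt08 ((x >>> (bits - 2)) &&& 255)]) := by
        simp only [stepI, hxdef, if_pos hle]
        have h1 : bits + 6 - 8 = bits - 2 := by omega
        rw [h1, Nat.one_shiftLeft, Nat.and_two_pow_sub_one_eq_mod]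
      have hfmt : pvFmt08 ((x >>> (bits - 2)) &&& 255) = natBits (x >>> (bits - 2)) 8 := by
        have h255 : (255 : Nat) = 2 ^ 8 - 1 := by norm_num
        rw [h255, Nat.and_two_pow_sub_one_eq_mod,
          fmt08_eq_natBits _ (Nat.mod_lt _ (by norm_num))]
        have hm := natBits_mod (x >>> (bits - 2)) 8
        norm_num at hm
        rw [hm]
      have hsplit8 : natBits x (bits + 6) = natBits (x >>> (bits - 2)) 8 ++ natBits x (bits - 2) := by
        have h2 : bits + 6 = 8 + (bits - 2) := by omega
        rw [h2, natBits_split 8 (bits - 2) x]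
      have h8' : ∀ o ∈ out ++ [pvFmt08 ((x >>> (bits - 2)) &&& 255)], o.length = 8 := by
        intro o ho
        rcases List.mem_append.mp ho with h | h
        · exact h8 o h
        · simp only [List.mem_singleton] at h
          rw [h, hfmt, length_natBits]
      obtain ⟨c1, c2, c3⟩ := ih' (x % 2 ^ (bits - 2)) (bits - 2)
        (out ++ [pvFmt08 ((x >>> (bits - 2)) &&& 255)]) (by omega) h8'
      refine ⟨by simpa [hstep] using c1, by simpa [hstep] using c2, ?_⟩
      simp only [List.foldl_cons, hstep]
      rw [c3, natBits_mod, List.flatten_append, hfmt]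
      simp only [List.flatten_cons, List.flatten_nil, List.append_nil, List.map_cons,
        List.append_assoc]
      have hcomb : natBits (x >>> (bits - 2)) 8 ++ natBits x (bits - 2)
          = natBits buf bits ++ natBits i 6 := by rw [← hsplit8, hkey]
      congr 1
      rw [← List.append_assoc, ← List.append_assoc, hcomb]
    · -- no emission yet
      have hstep : stepI (buf, bits, out) i = (x, bits + 6, out) := by
        simp only [stepI, hxdef, if_neg hle]
      obtain ⟨c1, c2, c3⟩ := ih' x (bits + 6) out (by omega) h8
      refine ⟨by simpa [hstep] using c1, by simpa [hstep] using c2, ?_⟩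
      simp only [List.foldl_cons, hstep]
      rw [c3, hkey]
      simp [List.append_assoc]

theorem flatten_length_eq (out : List (List Char)) (h8 : ∀ o ∈ out, o.length = 8) :
    out.flatten.length = 8 * out.length := by
  induction out with
  | nil => simp
  | cons b rest ih =>
    simp only [List.flatten_cons, List.length_append, List.length_cons]
    rw [h8 b List.mem_cons_self, ih (fun o ho => h8 o (List.mem_cons_of_mem _ ho))]
    ring

theorem chunks_aux (out : List (List Char)) (h8 : ∀ o ∈ out, o.length = 8) :
    (List.range out.length).map (fun k => (out.flatten.drop (8 * k)).take 8) = out := by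
  induction out with
  | nil => simp
  | cons b rest ih =>
    have hb : b.length = 8 := h8 b List.mem_cons_self
    have h8' : ∀ o ∈ rest, o.length = 8 := fun o ho => h8 o (List.mem_cons_of_mem _ ho)
    simp only [List.length_cons, List.range_succ_eq_map, List.map_cons, List.map_map,
      List.flatten_cons]
    have h0 : (((b ++ rest.flatten).drop (8 * 0)).take 8) = b := by
      simpa using List.take_left' hb
    have hpt : ∀ k ∈ List.range rest.length,
        ((fun k => (((b ++ rest.flatten).drop (8 * k)).take 8)) ∘ Nat.succ) k
        = (fun k => ((rest.flatten.drop (8 * k)).take 8)) k := by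
      intro k hk
      simp only [Function.comp_apply]
      have hd : (b ++ rest.flatten).drop (8 * (k + 1)) = rest.flatten.drop (8 * k) := by
        have h1 : 8 * (k + 1) = 8 + 8 * k := by ring
        rw [h1, ← List.drop_drop, List.drop_left' hb]
      rw [hd]
    rw [h0, List.map_congr_left hpt, ih h8']

theorem chunk8 (out : List (List Char)) (h8 : ∀ o ∈ out, o.length = 8) :
    (PySem.List.pyRange 0 (PySem.List.len out.flatten) 8).map
      (fun i => PySem.List.slice out.flatten (some i) (some (i + 8))) = out := by
  have hlen : out.flatten.length = 8 * out.length := flatten_length_eq out h8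
  have hrange : PySem.List.pyRange 0 (PySem.List.len out.flatten) 8
      = (List.range out.length).map (fun k => ((8 * k : Nat) : Int)) := by
    rw [PySem.List.pyRange_of_pos _ _ (by norm_num)]
    have hcount : (if (0 : Int) < PySem.List.len out.flatten then
        ((PySem.List.len out.flatten - 0 + 8 - 1) / 8).toNat else 0) = out.length := by
      simp only [PySem.List.len_eq, hlen]
      by_cases h0 : out.length = 0
      · simp [h0]
      · rw [if_pos (by push_cast; omega)]
        push_cast
        omega
    rw [hcount]
    apply List.map_congr_left
    intro k _
    push_cast
    ring
  rw [hrange, List.map_map]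
  have hpt : ∀ k ∈ List.range out.length,
      ((fun i => PySem.List.slice out.flatten (some i) (some (i + 8))) ∘ fun k => ((8 * k : Nat) : Int)) k
      = (fun k => ((out.flatten.drop (8 * k)).take 8)) k := by
    intro k _
    simp only [Function.comp_apply]
    have h8c : ((8 * k : Nat) : Int) + 8 = ((8 * k : Nat) : Int) + ((8 : Nat) : Int) := by norm_num
    rw [h8c, PySem.List.slice_natCast_add]
  rw [List.map_congr_left hpt, chunks_aux out h8]

theorem mod_int_eq (L : Nat) : PySem.Int.mod (L : Nat) 8 = ((L % 8 : Nat) : Int) := by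
  show Int.fmod _ _ = _
  rw [Int.fmod_eq_emod]
  simp
  try omega

-- ===== VERDICT (by name: the statement is the Claim_ definition above) =====
theorem base64_a_binario_spec : Claim_equal_base64_a_binario := by
  intro s _ hpre
  have hpre' : ∀ c ∈ s.toList, c = '=' ∨ c ∈ pvTABLA := by
    intro c hc
    have := List.all_eq_true.mp hpre c hc
    simpa using this
  unfold Spec_base64_a_binario base64_a_binario base64_a_binario_alt
  rw [foldB_eq_foldI, foldA_eq]
  simp only [List.nil_append]
  set idxs := idxListOf s.toList with hidxs
  have hlt : ∀ i ∈ idxs, i < 64 := idxListOf_lt s.toList hpre'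
  obtain ⟨hb8, hlen8, heq⟩ := B_run idxs hlt 0 0 [] (by norm_num) (by simp)
  set st := idxs.foldl stepI (0, 0, []) with hst
  set T := (idxs.map (fun n => natBits n 6)).flatten with hT
  have hmapA : idxs.map (fun n => decimal_a_binario (n : Nat) 6)
      = idxs.map (fun n => natBits n 6) :=
    List.map_congr_left (fun n hn => dec_eq_natBits n (hlt n hn))
  have heq' : st.2.2.flatten ++ natBits st.1 st.2.1 = T := by
    simpa [natBits] using heq
  have hbc : PySem.Chars.join [] (idxs.map (fun n => decimal_a_binario (n : Nat) 6)) = T := by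
    rw [hmapA, join_nil_eq_flatten]
  have hTlen : T.length = 8 * st.2.2.length + st.2.1 := by
    have hcl := congrArg List.length heq'
    simp only [List.length_append, length_natBits,
      flatten_length_eq st.2.2 hlen8] at hcl
    omega
  have hsob : PySem.Int.mod (PySem.List.len T) 8 = ((st.2.1 : Nat) : Int) := by
    rw [PySem.List.len_eq, mod_int_eq T.length]
    congr 1
    omega
  rw [hbc, hsob]
  by_cases hz : st.2.1 = 0
  · have hTf : T = st.2.2.flatten := by
      rw [← heq', hz]
      simp [natBits]
    rw [if_neg (by simp [hz]), hTf, chunk8 st.2.2 hlen8]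
  · have hpos : 0 < st.2.1 := Nat.pos_of_ne_zero hz
    have hslice : PySem.List.slice T none (some (-((st.2.1 : Nat) : Int)))
        = st.2.2.flatten := by
      rw [PySem.List.slice_to_neg_natCast T st.2.1 hpos, ← heq']
      exact List.take_left' (by simp [flatten_length_eq st.2.2 hlen8, List.length_append, length_natBits])
    rw [if_pos (by simpa using hz), hslice, chunk8 st.2.2 hlen8]
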